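-- pv_equiv track=rewrite | github.com/plasma-umass/slipcover | src/slipcover/slipcover.py | format_missing
-- ===== SOURCE A (Python) =====
-- from typing import Dict, Set, List, Tuple, TYPE_CHECKING, Iterator, Optional
--
-- def format_missing(missing_lines: List[int], executed_lines: List[int],
--                    missing_branches: List[tuple]) -> str:
--     """Formats ranges of missing lines, including non-code (e.g., comments) ones that fall
--        between missed ones"""
--
--     missing_set = set(missing_lines)
--     missing_branches = [(a,b) for a,b in missing_branches if a not in missing_set and b not in missing_set]
--
--     def format_branch(br):
--         return f"{br[0]}->exit" if br[1] == 0 else f"{br[0]}->{br[1]}"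
--
--     def find_ranges():
--         executed = set(executed_lines)
--         it = iter(missing_lines)    # assumed sorted
--         a = next(it, None)
--         while a is not None:
--             while missing_branches and missing_branches[0][0] < a:
--                 yield format_branch(missing_branches.pop(0))
--
--             b = a
--             n = next(it, None)
--             while n is not None:
--                 if any(l in executed for l in range(b+1, n+1)):
--                     break
--
--                 b = n
--                 n = next(it, None)
--
--             yield str(a) if a == b else f"{a}-{b}"
--
--             a = n
--
--         while missing_branches:
--             yield format_branch(missing_branches.pop(0))
--
--     return ", ".join(find_ranges())
-- ===== SOURCE B (Python) =====
-- from bisect import bisect_left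
--
-- def format_missing(missing_lines, executed_lines, missing_branches):
--     """Formats ranges of missing lines, including non-code (e.g., comments) ones that fall
--        between missed ones"""
--     missing_set = set(missing_lines)
--     branches = [br for br in missing_branches
--                 if br[0] not in missing_set and br[1] not in missing_set]
--     ex = sorted(set(executed_lines))
--
--     def gap_hit(lo, hi):
--         # any executed line l with lo <= l <= hi, via binary search
--         i = bisect_left(ex, lo)
--         return i < len(ex) and ex[i] <= hi
--
--     def fmt_branch(br):
--         return f"{br[0]}->exit" if br[1] == 0 else f"{br[0]}->{br[1]}"
--
--     out = []
--     i = 0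
--     j = 0
--     L = len(missing_lines)
--     while i < L:
--         a = missing_lines[i]
--         while j < len(branches) and branches[j][0] < a:
--             out.append(fmt_branch(branches[j]))
--             j += 1
--         b = a
--         i += 1
--         while i < L and not gap_hit(b + 1, missing_lines[i]):
--             b = missing_lines[i]
--             i += 1
--         out.append(str(a) if a == b else f"{a}-{b}")
--     out.extend(fmt_branch(br) for br in branches[j:])
--     return ", ".join(out)
-- ===== Notes on version B (the rewrite author's own statement) =====
-- stated objective: alternative
-- what changed: Replaces the per-gap linear membership scan over range(b+1,n+1) with a bisect_left binary search on the sorted distinct executed lines, and replaces the missing_branches.pop(0) consumption with an advancing index into the filtered branch list, appending to an output list instead of a generator.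
import Mathlib
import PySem

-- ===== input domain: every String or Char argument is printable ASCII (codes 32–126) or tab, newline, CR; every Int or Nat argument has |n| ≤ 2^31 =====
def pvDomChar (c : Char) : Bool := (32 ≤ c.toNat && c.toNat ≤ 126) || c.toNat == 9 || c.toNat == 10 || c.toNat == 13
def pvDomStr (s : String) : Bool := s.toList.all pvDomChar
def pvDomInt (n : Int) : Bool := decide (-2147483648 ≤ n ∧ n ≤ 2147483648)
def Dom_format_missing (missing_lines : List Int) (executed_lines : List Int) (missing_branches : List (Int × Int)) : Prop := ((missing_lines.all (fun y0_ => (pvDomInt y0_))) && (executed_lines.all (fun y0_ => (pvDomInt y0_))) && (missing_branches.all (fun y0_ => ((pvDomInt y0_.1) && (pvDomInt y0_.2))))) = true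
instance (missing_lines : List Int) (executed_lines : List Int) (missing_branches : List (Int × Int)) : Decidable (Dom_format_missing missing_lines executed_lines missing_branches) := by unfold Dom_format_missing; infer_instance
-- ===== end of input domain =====

-- B checks each gap by bisecting the sorted distinct executed lines instead of scanning the whole
-- gap, and consumes the branch list through an advancing index instead of pop(0) (objective: alternative).

-- ===== PORT A =====
-- format_branch
def pvFmtBranchA (br : Int × Int) : String :=
  if br.2 == 0 then PySem.Int.toStr br.1 ++ "->exit"
  else PySem.Int.toStr br.1 ++ "->" ++ PySem.Int.toStr br.2

-- inner 'while n is not None: if any(l in executed for l in range(b+1, n+1)): break; b = n; n = next(...)'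
def pvExtendA (executed : PySem.Set Int) (b : Int) : List Int → Int × List Int
  | [] => (b, [])
  | n :: rest =>
      if (PySem.List.pyRange (b + 1) (n + 1) 1).any (fun l => PySem.Set.contains executed l) then
        (b, n :: rest)
      else pvExtendA executed n rest

-- termination measure for the outer loop: the inner loop only consumes the iterator
theorem pvExtendA_length_le (executed : PySem.Set Int) (b : Int) (xs : List Int) :
    (pvExtendA executed b xs).2.length ≤ xs.length := by
  induction xs generalizing b with
  | nil => simp [pvExtendA]
  | cons n rest ih =>
      simp only [pvExtendA]
      split
      · simp
      · exact Nat.le_succ_of_le (ih n)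

-- the generator find_ranges(): outer 'while a is not None' plus the final branch drain
def pvRangesA (executed : PySem.Set Int) (ms : List Int) (brs : List (Int × Int)) : List String :=
  match ms with
  | [] => brs.map pvFmtBranchA
  | a :: rest =>
      let pre := brs.takeWhile (fun br => decide (br.1 < a))
      let brs' := brs.dropWhile (fun br => decide (br.1 < a))
      let res := pvExtendA executed a rest
      pre.map pvFmtBranchA
        ++ [(if a == res.1 then PySem.Int.toStr a
             else PySem.Int.toStr a ++ "-" ++ PySem.Int.toStr res.1)]
        ++ pvRangesA executed res.2 brs'
termination_by ms.length
decreasing_by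
  exact Nat.lt_succ_of_le (pvExtendA_length_le executed a rest)

def format_missing (missing_lines : List Int) (executed_lines : List Int) (missing_branches : List (Int × Int)) : String :=
  let missing_set := PySem.Set.ofList missing_lines
  let mb := missing_branches.filter
    (fun p => !(PySem.Set.contains missing_set p.1) && !(PySem.Set.contains missing_set p.2))
  PySem.Str.join ", " (pvRangesA (PySem.Set.ofList executed_lines) missing_lines mb)

-- ===== PORT B =====
def pvFmtBranchB (br : Int × Int) : String :=
  if br.2 == 0 then PySem.Int.toStr br.1 ++ "->exit"
  else PySem.Int.toStr br.1 ++ "->" ++ PySem.Int.toStr br.2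

-- gap_hit(lo, hi): bisect_left on the sorted executed lines (PySem.List.bisectLeft = bisect.bisect_left)
def pvGapHit (ex : List Int) (lo hi : Int) : Bool :=
  match ex[PySem.List.bisectLeft ex lo]? with
  | some x => decide (x ≤ hi)
  | none => false

-- 'while j < len(branches) and branches[j][0] < a: out.append(...); j += 1' (emitted labels, remaining branches)
def pvEmitBrB (a : Int) : List (Int × Int) → List String × List (Int × Int)
  | [] => ([], [])
  | br :: t =>
      if br.1 < a then
        let r := pvEmitBrB a t
        (pvFmtBranchB br :: r.1, r.2)
      else ([], br :: t)

-- 'while i < L and not gap_hit(b + 1, missing_lines[i]): b = missing_lines[i]; i += 1'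
def pvMergeB (ex : List Int) (b : Int) : List Int → Int × List Int
  | [] => (b, [])
  | n :: t => if pvGapHit ex (b + 1) n then (b, n :: t) else pvMergeB ex n t

theorem pvMergeB_length_le (ex : List Int) (b : Int) (xs : List Int) :
    (pvMergeB ex b xs).2.length ≤ xs.length := by
  induction xs generalizing b with
  | nil => simp [pvMergeB]
  | cons n rest ih =>
      simp only [pvMergeB]
      split
      · simp
      · exact Nat.le_succ_of_le (ih n)

-- the main 'while i < L' loop with the accumulator out, then 'out.extend(... branches[j:])'
def pvLoopB (ex : List Int) (ms : List Int) (brs : List (Int × Int)) (out : List String) : List String :=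
  match ms with
  | [] => out ++ brs.map pvFmtBranchB
  | a :: rest =>
      let e := pvEmitBrB a brs
      let m := pvMergeB ex a rest
      pvLoopB ex m.2 e.2
        ((out ++ e.1) ++ [(if a == m.1 then PySem.Int.toStr a
                           else PySem.Int.toStr a ++ "-" ++ PySem.Int.toStr m.1)])
termination_by ms.length
decreasing_by
  exact Nat.lt_succ_of_le (pvMergeB_length_le ex a rest)

def format_missing_alt (missing_lines : List Int) (executed_lines : List Int) (missing_branches : List (Int × Int)) : String :=
  let missing_set := PySem.Set.ofList missing_lines
  let branches := missing_branches.filter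
    (fun p => !(PySem.Set.contains missing_set p.1) && !(PySem.Set.contains missing_set p.2))
  let ex := PySem.List.sorted (PySem.Set.ofList executed_lines) (fun x => x)
  PySem.Str.join ", " (pvLoopB ex missing_lines branches [])

-- ===== PRECONDITION & SPEC =====
def Spec_format_missing (missing_lines : List Int) (executed_lines : List Int) (missing_branches : List (Int × Int)) (out : String) : Prop := out = format_missing_alt missing_lines executed_lines missing_branches
instance (missing_lines : List Int) (executed_lines : List Int) (missing_branches : List (Int × Int)) (out : String) : Decidable (Spec_format_missing missing_lines executed_lines missing_branches out) := by unfold Spec_format_missing; infer_instance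

-- ===== CLAIM (what is proved, stated in full; the proofs are below) =====
def Claim_equal_format_missing : Prop := ∀ (missing_lines : List Int) (executed_lines : List Int) (missing_branches : List (Int × Int)), Dom_format_missing missing_lines executed_lines missing_branches → Spec_format_missing missing_lines executed_lines missing_branches (format_missing missing_lines executed_lines missing_branches)

-- ===== LEMMAS AND PROOFS =====

-- the two branch formatters are the same function
theorem pvFmtBranch_eq : pvFmtBranchB = pvFmtBranchA := rfl

-- B's binary-search gap test equals A's linear scan of range(b+1, n+1) against the executed set
theorem pvGapHit_eq (el : List Int) (b n : Int) :
    pvGapHit (PySem.List.sorted (PySem.Set.ofList el) (fun x => x)) (b + 1) n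
      = (PySem.List.pyRange (b + 1) (n + 1) 1).any (fun l => PySem.Set.contains (PySem.Set.ofList el) l) := by
  set ex := PySem.List.sorted (PySem.Set.ofList el) (fun x => x) with hex
  have hpair : List.Pairwise (fun a b => a ≤ b) ex :=
    PySem.List.sorted_pairwise (PySem.Set.ofList el) (fun x => x)
  have hperm : ex.Perm (PySem.Set.ofList el) := PySem.List.sorted_perm _ _ false
  have hmem : ∀ x : Int, x ∈ ex ↔ x ∈ el := by
    intro x
    rw [hperm.mem_iff, PySem.Set.mem_ofList]
  have hspec := PySem.List.bisectLeft_spec ex (b + 1) hpair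
  rw [Bool.eq_iff_iff]
  constructor
  · intro h
    unfold pvGapHit at h
    rcases hx : ex[PySem.List.bisectLeft ex (b + 1)]? with _ | x
    · rw [hx] at h; exact absurd h (by simp)
    · rw [hx] at h
      simp only [decide_eq_true_eq] at h
      have hi : PySem.List.bisectLeft ex (b + 1) < ex.length := by
        by_contra hge
        rw [List.getElem?_eq_none (by omega)] at hx; simp at hx
      have hxval : ex[PySem.List.bisectLeft ex (b + 1)] = x := by
        rw [List.getElem?_eq_getElem hi] at hx; exact Option.some.inj hx
      have hge : b + 1 ≤ x := by
        have := hspec.2.2 _ hi (le_refl _); rwa [hxval] at this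
      rw [List.any_eq_true]
      refine ⟨x, ?_, ?_⟩
      · rw [PySem.List.mem_pyRange_one]; omega
      · rw [PySem.Set.contains_iff, PySem.Set.mem_ofList, ← hmem]
        exact hxval ▸ List.getElem_mem hi
  · intro h
    rw [List.any_eq_true] at h
    obtain ⟨y, hyr, hyc⟩ := h
    rw [PySem.List.mem_pyRange_one] at hyr
    rw [PySem.Set.contains_iff, PySem.Set.mem_ofList, ← hmem] at hyc
    obtain ⟨j, hj, hjy⟩ := List.getElem_of_mem hyc
    have hij : PySem.List.bisectLeft ex (b + 1) ≤ j := by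
      by_contra hlt
      have := hspec.2.1 j hj (by omega)
      omega
    have hi : PySem.List.bisectLeft ex (b + 1) < ex.length := lt_of_le_of_lt hij hj
    have hmono : ex[PySem.List.bisectLeft ex (b + 1)] ≤ ex[j] :=
      List.Pairwise.rel_get_of_le hpair (by simpa using hij) -- sorted: earlier ≤ later
    unfold pvGapHit
    rw [List.getElem?_eq_getElem hi]
    simp only [decide_eq_true_eq]
    have : ex[j] = y := hjy
    omega

-- hence the two merge loops agree
theorem pvMergeB_eq_pvExtendA (el : List Int) (b : Int) (xs : List Int) :
    pvMergeB (PySem.List.sorted (PySem.Set.ofList el) (fun x => x)) b xs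
      = pvExtendA (PySem.Set.ofList el) b xs := by
  induction xs generalizing b with
  | nil => rfl
  | cons n rest ih =>
      simp only [pvMergeB, pvExtendA, pvGapHit_eq el b n]
      split
      · rfl
      · exact ih n

-- B's index walk over the branches is A's takeWhile/dropWhile pop loop
theorem pvEmitBrB_eq (a : Int) (brs : List (Int × Int)) :
    pvEmitBrB a brs
      = ((brs.takeWhile (fun br => decide (br.1 < a))).map pvFmtBranchA,
         brs.dropWhile (fun br => decide (br.1 < a))) := by
  induction brs with
  | nil => rfl
  | cons br t ih =>
      simp only [pvEmitBrB, List.takeWhile_cons, List.dropWhile_cons]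
      by_cases h : br.1 < a
      · simp [h, ih, pvFmtBranch_eq]
      · simp [h]

-- main loop invariant: B's accumulator loop produces out ++ A's generator output
theorem pvLoopB_eq (el : List Int) (k : Nat) (ms : List Int) (hk : ms.length ≤ k)
    (brs : List (Int × Int)) (out : List String) :
    pvLoopB (PySem.List.sorted (PySem.Set.ofList el) (fun x => x)) ms brs out
      = out ++ pvRangesA (PySem.Set.ofList el) ms brs := by
  induction k generalizing ms brs out with
  | zero =>
      have : ms = [] := List.eq_nil_of_length_eq_zero (Nat.le_zero.mp hk)
      subst this
      simp [pvLoopB, pvRangesA, pvFmtBranch_eq]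
  | succ k ih =>
      match ms with
      | [] => simp [pvLoopB, pvRangesA, pvFmtBranch_eq]
      | a :: rest =>
          rw [pvLoopB, pvRangesA]
          simp only [pvEmitBrB_eq, pvMergeB_eq_pvExtendA]
          have hlen : (pvExtendA (PySem.Set.ofList el) a rest).2.length ≤ k := by
            have := pvExtendA_length_le (PySem.Set.ofList el) a rest
            simp only [List.length_cons] at hk
            omega
          rw [ih _ hlen]
          simp [List.append_assoc]

theorem format_missing_spec : Claim_equal_format_missing := by
  intro ml el mb _
  unfold Spec_format_missing format_missing format_missing_alt
  simp only []
  rw [pvLoopB_eq el ml.length ml (le_refl _)]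
  rfl
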